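-- pv_equiv track=rewrite | github.com/ethanyys/NSLN | utils.py | pad_word_chars
-- ===== SOURCE A (Python) =====
-- def pad_word_chars(words, word_len, maxlen):
--     """
--     Pad the characters of the words in a sentence.
--     Input:
--         - list of lists of ints (list of words, a word being a list of char indexes)
--     Output:
--         - padded list of lists of ints
--         - list of ints corresponding to the index of the last character of each word
--     """
--     max_length = word_len
--     char = []
--     for word in words:
--         padding = [0] * (max_length - len(word))
--         char.append(word + padding)
--     tmp = [0] * word_len
--     for i in range(maxlen - len(words)):
--         char.append(tmp)
--     return char
-- ===== SOURCE B (Python) =====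
-- def pad_word_chars(words, word_len, maxlen):
--     n = max(len(words), maxlen)
--     char = [[0] * word_len for _ in range(n)]
--     for i, w in enumerate(words):
--         char[i][:len(w)] = w
--     return char
-- ===== Notes on version B (the rewrite author's own statement) =====
-- stated objective: alternative
-- what changed: B preallocates a fixed zero grid of max(len(words), maxlen) rows and fills each word's row in place via slice assignment, instead of A's incremental append of padded rows followed by a padding-row loop.
import Mathlib
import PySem

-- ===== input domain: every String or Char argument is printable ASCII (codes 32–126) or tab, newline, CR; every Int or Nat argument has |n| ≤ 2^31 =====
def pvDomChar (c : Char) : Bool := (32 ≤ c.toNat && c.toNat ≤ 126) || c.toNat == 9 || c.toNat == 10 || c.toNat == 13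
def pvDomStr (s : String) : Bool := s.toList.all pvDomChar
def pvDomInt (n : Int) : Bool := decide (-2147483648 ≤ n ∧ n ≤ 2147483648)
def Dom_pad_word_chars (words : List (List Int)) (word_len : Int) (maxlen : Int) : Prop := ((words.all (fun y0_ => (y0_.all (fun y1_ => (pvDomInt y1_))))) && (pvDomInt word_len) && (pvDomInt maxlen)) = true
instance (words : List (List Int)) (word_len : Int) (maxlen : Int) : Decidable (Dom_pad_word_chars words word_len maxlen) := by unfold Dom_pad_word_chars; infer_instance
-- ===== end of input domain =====

-- B replaces A's incremental row-by-row growth by allocate-then-fill: a fixed zero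
-- grid is preallocated and each word overwrites its row's leading cells (objective:
-- alternative decomposition, same cost; return value proved equal).

-- ===== PORT A =====
def pad_word_chars (words : List (List Int)) (word_len : Int) (maxlen : Int) : List (List Int) :=
  let max_length := word_len
  let char := words.foldl (fun char word =>
    let padding := List.replicate (max_length - (word.length : Int)).toNat (0 : Int)
    char ++ [word ++ padding]) []
  let tmp := List.replicate word_len.toNat (0 : Int)
  (PySem.List.pyRange 0 (maxlen - (words.length : Int)) 1).foldl (fun char _ => char ++ [tmp]) char

-- ===== PORT B =====
def pad_word_chars_alt (words : List (List Int)) (word_len : Int) (maxlen : Int) : List (List Int) :=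
  let n := (max ((words.length : Int)) maxlen).toNat
  let char := List.replicate n (List.replicate word_len.toNat (0 : Int))
  -- char[i][:len(w)] = w  ==  row becomes w ++ row[len(w):]
  (words.zipIdx).foldl (fun char wi =>
    char.set wi.2 (wi.1 ++ (char.getD wi.2 []).drop wi.1.length)) char

-- ===== PRECONDITION & SPEC =====
def Spec_pad_word_chars (words : List (List Int)) (word_len : Int) (maxlen : Int) (out : List (List Int)) : Prop := out = pad_word_chars_alt words word_len maxlen
instance (words : List (List Int)) (word_len : Int) (maxlen : Int) (out : List (List Int)) : Decidable (Spec_pad_word_chars words word_len maxlen out) := by unfold Spec_pad_word_chars; infer_instance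

-- ===== CLAIM (what is proved, stated in full; the proofs are below) =====
def Claim_equal_pad_word_chars : Prop := ∀ (words : List (List Int)) (word_len : Int) (maxlen : Int), Dom_pad_word_chars words word_len maxlen → Spec_pad_word_chars words word_len maxlen (pad_word_chars words word_len maxlen)

-- ===== LEMMAS AND PROOFS =====

theorem pv_foldl_snoc (l : List (List Int)) (f : List Int → List Int) :
    ∀ init : List (List Int),
      l.foldl (fun c w => c ++ [f w]) init = init ++ l.map f := by
  induction l with
  | nil => simp
  | cons w l ih => intro init; simp [List.foldl_cons, ih]

theorem pv_foldl_const (l : List Int) (tmp : List Int) :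
    ∀ init : List (List Int),
      l.foldl (fun c _ => c ++ [tmp]) init = init ++ List.replicate l.length tmp := by
  induction l with
  | nil => simp
  | cons x l ih =>
      intro init
      rw [List.foldl_cons, ih]
      simp [List.replicate_succ, List.append_assoc]

theorem pv_getD_append (pre : List (List Int)) (z : List Int) (rest : List (List Int)) :
    (pre ++ z :: rest).getD pre.length [] = z := by
  induction pre with
  | nil => simp [List.getD]
  | cons p pre ih => simp [List.getD] at ih ⊢

theorem pv_set_append (pre : List (List Int)) (z : List Int) (rest : List (List Int)) (y : List Int) :
    (pre ++ z :: rest).set pre.length y = pre ++ y :: rest := by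
  induction pre with
  | nil => simp
  | cons p pre ih => simp [ih]

theorem pv_fill (z : List Int) :
    ∀ (ws : List (List Int)) (pre : List (List Int)) (m : Nat), ws.length ≤ m →
      (ws.zipIdx pre.length).foldl
        (fun c wi => c.set wi.2 (wi.1 ++ (c.getD wi.2 []).drop wi.1.length))
        (pre ++ List.replicate m z)
      = pre ++ ws.map (fun w => w ++ z.drop w.length) ++ List.replicate (m - ws.length) z := by
  intro ws
  induction ws with
  | nil => intro pre m _; simp
  | cons w ws ih =>
      intro pre m hm
      obtain ⟨m', rfl⟩ : ∃ m', m = m' + 1 := by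
        cases m with
        | zero => simp at hm
        | succ m' => exact ⟨m', rfl⟩
      have hm' : ws.length ≤ m' := by simpa using hm
      rw [List.replicate_succ]
      simp only [List.zipIdx_cons, List.foldl_cons]
      rw [pv_getD_append, pv_set_append]
      have h1 : pre ++ (w ++ z.drop w.length) :: List.replicate m' z
          = (pre ++ [w ++ z.drop w.length]) ++ List.replicate m' z := by simp
      have h2 : pre.length + 1 = (pre ++ [w ++ z.drop w.length]).length := by simp
      rw [h1, h2, ih (pre ++ [w ++ z.drop w.length]) m' hm']
      simp

theorem pad_word_chars_eq (words : List (List Int)) (word_len : Int) (maxlen : Int) :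
    pad_word_chars words word_len maxlen = pad_word_chars_alt words word_len maxlen := by
  unfold pad_word_chars pad_word_chars_alt
  have hA : ∀ init : List (List Int),
      (PySem.List.pyRange 0 (maxlen - (words.length : Int)) 1).foldl
        (fun c _ => c ++ [List.replicate word_len.toNat (0 : Int)]) init
      = init ++ List.replicate (maxlen - (words.length : Int)).toNat
          (List.replicate word_len.toNat (0 : Int)) := by
    intro init
    rw [pv_foldl_const, PySem.List.length_pyRange_one]
    norm_num
  rw [hA, pv_foldl_snoc]
  have hB := pv_fill (List.replicate word_len.toNat (0 : Int)) words []
      ((max ((words.length : Int)) maxlen).toNat)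
      (by
        have := Int.toNat_le_toNat (le_max_left ((words.length : Int)) maxlen)
        omega)
  simp only [List.length_nil, List.nil_append] at hB
  rw [hB]
  have hmap : (fun (w : List Int) => w ++
        List.replicate ((word_len - (w.length : Int)).toNat) (0 : Int))
      = fun w => w ++ (List.replicate word_len.toNat (0 : Int)).drop w.length := by
    funext w
    have h : (word_len - (w.length : Int)).toNat = word_len.toNat - w.length := by omega
    rw [List.drop_replicate, h]
  rw [hmap]
  have hcnt : (max ((words.length : Int)) maxlen).toNat - words.length
      = (maxlen - (words.length : Int)).toNat := by
    rcases le_total ((words.length : Int)) maxlen with h | h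
    · rw [max_eq_right h]; omega
    · rw [max_eq_left h]; omega
  rw [hcnt]
  simp

-- ===== VERDICT (by name: the statement is the Claim_ definition above) =====
theorem pad_word_chars_spec : Claim_equal_pad_word_chars := by
  intro words word_len maxlen _
  unfold Spec_pad_word_chars
  exact pad_word_chars_eq words word_len maxlen
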